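-- pv_equiv track=rewrite | github.com/yanshen43/MCAT | seq_gen.py | build_markov
-- ===== SOURCE A (Python) =====
-- def build_markov(order=1):
-- 	chars = ['A','G','C','T']
--
-- 	if order == 1:
-- 		model = {x:{x:0 for x in chars} for x in chars}
-- 		return model
--
-- 	perm = chars
-- 	for i in range(1,order):
-- 		perm = permutations(perm)
--
-- 	return {x:{x:0 for x in chars} for x in perm}
--
-- def permutations(perm):
-- 	chars = ['A','G','C','T']
-- 	res = []
-- 	for c in chars:
-- 		res += [x+c for x in perm]
-- 	return res
-- ===== SOURCE B (Python) =====
-- from itertools import product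
--
-- def build_markov(order=1):
--     chars = ['A', 'G', 'C', 'T']
--     n = order if order > 1 else 1
--     return {''.join(reversed(p)): {c: 0 for c in chars}
--             for p in product(chars, repeat=n)}
-- ===== Notes on version B (the rewrite author's own statement) =====
-- stated objective: idiomatic
-- what changed: Replaces the incremental permutations helper (repeated order-1 list-rebuilding passes of growing suffix lists) with a single direct enumeration of the cartesian product via itertools.product, joining each tuple reversed to reproduce A's key order.
import Mathlib
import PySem

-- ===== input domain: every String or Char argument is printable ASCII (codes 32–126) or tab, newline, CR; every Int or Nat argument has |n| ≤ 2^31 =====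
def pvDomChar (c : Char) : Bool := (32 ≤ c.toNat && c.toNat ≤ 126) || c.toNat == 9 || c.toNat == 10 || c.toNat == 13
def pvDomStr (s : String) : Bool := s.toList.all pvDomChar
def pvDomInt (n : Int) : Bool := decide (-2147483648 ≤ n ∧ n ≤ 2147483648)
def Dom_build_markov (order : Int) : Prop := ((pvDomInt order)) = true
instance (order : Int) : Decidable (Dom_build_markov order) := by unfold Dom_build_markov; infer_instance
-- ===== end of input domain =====

-- B replaces A's incremental order-1 suffix-building passes (the permutations helper)
-- by a single direct enumeration of the cartesian product of the alphabet (more idiomatic).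

-- ===== PORT A =====
-- permutations(perm): res = []; for c in chars: res += [x+c for x in perm]
def permutationsA (perm : List String) : List String :=
  ["A", "G", "C", "T"].foldl (fun res c => res ++ perm.map (fun x => x ++ c)) []

def build_markov (order : Int) : List (String × List (String × Int)) :=
  let chars : List String := ["A", "G", "C", "T"]
  if order == 1 then
    chars.map (fun x => (x, chars.map (fun y => (y, (0 : Int)))))
  else
    let perm := (PySem.List.pyRange 1 order 1).foldl (fun p _ => permutationsA p) chars
    perm.map (fun x => (x, chars.map (fun y => (y, (0 : Int)))))

-- ===== PORT B =====
-- itertools.product(chars, repeat=n): first coordinate varies slowest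
def prodRep (cs : List Char) : Nat → List (List Char)
  | 0 => [[]]
  | k + 1 => cs.flatMap (fun a => (prodRep cs k).map (fun t => a :: t))

def build_markov_alt (order : Int) : List (String × List (String × Int)) :=
  let chars : List Char := ['A', 'G', 'C', 'T']
  let n : Int := if order > 1 then order else 1
  (prodRep chars n.toNat).map
    (fun p => (String.ofList p.reverse, chars.map (fun c => (String.ofList [c], (0 : Int)))))

-- ===== PRECONDITION & SPEC =====
def Spec_build_markov (order : Int) (out : List (String × List (String × Int))) : Prop := out = build_markov_alt order
instance (order : Int) (out : List (String × List (String × Int))) : Decidable (Spec_build_markov order out) := by unfold Spec_build_markov; infer_instance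

-- ===== CLAIM (what is proved, stated in full; the proofs are below) =====
def Claim_equal_build_markov : Prop := ∀ (order : Int), Dom_build_markov order → Spec_build_markov order (build_markov order)

-- ===== LEMMAS AND PROOFS =====

-- the key list B enumerates for word length n
def keysB (n : Nat) : List String := (prodRep ['A', 'G', 'C', 'T'] n).map (fun p => String.ofList p.reverse)

theorem permutationsA_keysB (n : Nat) : permutationsA (keysB n) = keysB (n + 1) := by
  simp only [permutationsA, keysB, prodRep, PySem.List.foldl_append_eq_flatMap,
    List.nil_append, List.flatMap_cons, List.flatMap_nil, List.append_nil, List.map_map, List.map_append]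
  congr 1
  · exact List.map_congr_left (fun t _ => by simp)
  congr 1
  · exact List.map_congr_left (fun t _ => by simp)
  congr 1
  · exact List.map_congr_left (fun t _ => by simp)
  · exact List.map_congr_left (fun t _ => by simp)

theorem iterate_keysB (k : Nat) : permutationsA^[k] (keysB 1) = keysB (k + 1) := by
  induction k with
  | zero => rfl
  | succ k ih =>
    rw [Function.iterate_succ_apply', ih, permutationsA_keysB]

theorem foldl_const_iterate (l : List Int) (init : List String) :
    l.foldl (fun p _ => permutationsA p) init = permutationsA^[l.length] init := by
  induction l generalizing init with
  | nil => rfl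
  | cons x xs ih =>
    rw [List.foldl_cons, ih, List.length_cons, Function.iterate_succ_apply]

theorem chars_eq_keysB_one : (["A", "G", "C", "T"] : List String) = keysB 1 := by
  simp [keysB, prodRep]

-- ===== VERDICT (by name: the statement is the Claim_ definition above) =====
theorem build_markov_spec : Claim_equal_build_markov := by
  intro order _
  unfold Spec_build_markov build_markov build_markov_alt
  by_cases h1 : order = 1
  · subst h1; decide
  · simp only [beq_iff_eq, h1, if_false]
    rw [chars_eq_keysB_one, foldl_const_iterate, PySem.List.length_pyRange_one, iterate_keysB]
    by_cases h2 : order > 1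
    · have hn : (order - 1).toNat + 1 = (if order > 1 then order else 1).toNat := by
        rw [if_pos h2]; omega
      rw [hn]
      simp only [keysB, List.map_map]
      exact List.map_congr_left (fun a _ => by simp [prodRep])
    · have hn : (order - 1).toNat + 1 = (if order > 1 then order else 1).toNat := by
        rw [if_neg h2]; omega
      rw [hn]
      simp only [keysB, List.map_map]
      exact List.map_congr_left (fun a _ => by simp [prodRep])
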